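-- pv_equiv track=rewrite | github.com/dfrechiani/redato | backend/notamil-backend/redato_backend/whatsapp/jogo_partida.py | classificar_codigos
-- ===== SOURCE A (Python) =====
-- from typing import Dict, List, Optional, Tuple
--
-- PREFIXO_TO_TIPO: Dict[str, str] = {
--     "E": "ESTRUTURAL",
--     "P": "PROBLEMA",
--     "R": "REPERTORIO",
--     "K": "PALAVRA_CHAVE",
--     "A": "AGENTE",
--     "AC": "ACAO",
--     "ME": "MEIO",
--     "F": "FIM",
-- }
--
-- def codigo_to_tipo(codigo: str) -> Optional[str]:
--     """Retorna o tipo enum DB ('PROBLEMA', 'ACAO', 'ESTRUTURAL', ...)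
--     ou None se prefix não bate com nenhum padrão."""
--     cod = codigo.upper()
--     # Tentar prefixos de 2 letras primeiro
--     for pref in ("AC", "ME"):
--         if cod.startswith(pref) and cod[2:].isdigit():
--             return PREFIXO_TO_TIPO[pref]
--     # Depois 1 letra
--     for pref in ("E", "P", "R", "K", "A", "F"):
--         if cod.startswith(pref) and cod[1:].isdigit():
--             return PREFIXO_TO_TIPO[pref]
--     return None
--
-- def classificar_codigos(codigos: List[str]) -> Dict[str, List[str]]:
--     """Agrupa codigos por tipo (preserva ordem de aparição dentro do
--     tipo). Ex.: {"ESTRUTURAL": ["E01", "E10"], "PROBLEMA": ["P03"]}."""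
--     out: Dict[str, List[str]] = {}
--     for cod in codigos:
--         tipo = codigo_to_tipo(cod)
--         if tipo is None:
--             continue
--         out.setdefault(tipo, []).append(cod)
--     return out
-- ===== SOURCE B (Python) =====
-- from typing import Dict, List, Optional
--
-- PREFIXO_TO_TIPO: Dict[str, str] = {
--     "E": "ESTRUTURAL",
--     "P": "PROBLEMA",
--     "R": "REPERTORIO",
--     "K": "PALAVRA_CHAVE",
--     "A": "AGENTE",
--     "ME": "MEIO",
--     "AC": "ACAO",
--     "F": "FIM",
-- }
--
-- def _tipo(codigo: str) -> Optional[str]: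
--     """Split the uppercased code into its leading alphabetic run and the rest;
--     one dict lookup replaces the ordered startswith probes."""
--     cod = codigo.upper()
--     k = 0
--     while k < len(cod) and cod[k].isalpha():
--         k += 1
--     resto = cod[k:]
--     if resto.isdigit():          # implies resto != ""
--         return PREFIXO_TO_TIPO.get(cod[:k])
--     return None
--
-- def classificar_codigos(codigos: List[str]) -> Dict[str, List[str]]:
--     pares = [(_tipo(c), c) for c in codigos]
--     ordem = dict.fromkeys(t for t, _ in pares if t is not None)
--     return {t: [c for tt, c in pares if tt == t] for t in ordem}
-- ===== Notes on version B (the rewrite author's own statement) =====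
-- stated objective: idiomatic
-- what changed: codigo_to_tipo's ordered sequence of eight startswith/isdigit probes is replaced by splitting the uppercased code once into its leading alphabetic run and remainder followed by a single dict .get; the grouping is rebuilt as comprehensions (tipo-tagged pairs, dict.fromkeys for first-appearance key order, one dict comprehension) instead of a setdefault-append loop.
import Mathlib
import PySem

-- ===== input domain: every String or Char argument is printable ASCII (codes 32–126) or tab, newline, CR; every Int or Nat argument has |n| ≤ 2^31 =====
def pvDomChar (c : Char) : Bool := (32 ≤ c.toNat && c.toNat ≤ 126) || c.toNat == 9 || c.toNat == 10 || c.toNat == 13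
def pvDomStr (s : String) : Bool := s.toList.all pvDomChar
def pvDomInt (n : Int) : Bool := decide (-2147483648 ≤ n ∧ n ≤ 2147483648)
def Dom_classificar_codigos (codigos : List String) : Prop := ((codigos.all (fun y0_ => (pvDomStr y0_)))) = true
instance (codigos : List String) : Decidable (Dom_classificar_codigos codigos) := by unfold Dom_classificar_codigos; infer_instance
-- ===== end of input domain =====

-- B replaces A's ordered startswith/isdigit probes by one prefix split + dict lookup and
-- rebuilds the grouping with comprehensions over tipo-tagged pairs (objective: idiomatic).

-- ===== PORT A =====
def prefixoToTipo : PySem.Dict String String := PySem.Dict.ofList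
  [("E", "ESTRUTURAL"), ("P", "PROBLEMA"), ("R", "REPERTORIO"), ("K", "PALAVRA_CHAVE"),
   ("A", "AGENTE"), ("AC", "ACAO"), ("ME", "MEIO"), ("F", "FIM")]

-- PREFIXO_TO_TIPO[pref]: the key is always a literal present in the dict, so getD is exact here
def codigo_to_tipo (codigo : String) : Option String :=
  let cod := PySem.Str.upper codigo
  -- for pref in ("AC", "ME"), unrolled
  if PySem.Str.startswith cod "AC" && PySem.Str.strIsdigit (PySem.Str.slice cod (some 2) none) then
    some (PySem.Dict.getD prefixoToTipo "AC" "")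
  else if PySem.Str.startswith cod "ME" && PySem.Str.strIsdigit (PySem.Str.slice cod (some 2) none) then
    some (PySem.Dict.getD prefixoToTipo "ME" "")
  -- for pref in ("E", "P", "R", "K", "A", "F"), unrolled
  else if PySem.Str.startswith cod "E" && PySem.Str.strIsdigit (PySem.Str.slice cod (some 1) none) then
    some (PySem.Dict.getD prefixoToTipo "E" "")
  else if PySem.Str.startswith cod "P" && PySem.Str.strIsdigit (PySem.Str.slice cod (some 1) none) then
    some (PySem.Dict.getD prefixoToTipo "P" "")
  else if PySem.Str.startswith cod "R" && PySem.Str.strIsdigit (PySem.Str.slice cod (some 1) none) then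
    some (PySem.Dict.getD prefixoToTipo "R" "")
  else if PySem.Str.startswith cod "K" && PySem.Str.strIsdigit (PySem.Str.slice cod (some 1) none) then
    some (PySem.Dict.getD prefixoToTipo "K" "")
  else if PySem.Str.startswith cod "A" && PySem.Str.strIsdigit (PySem.Str.slice cod (some 1) none) then
    some (PySem.Dict.getD prefixoToTipo "A" "")
  else if PySem.Str.startswith cod "F" && PySem.Str.strIsdigit (PySem.Str.slice cod (some 1) none) then
    some (PySem.Dict.getD prefixoToTipo "F" "")
  else none

-- out.setdefault(tipo, []).append(cod) is exactly out[tipo] = out.get(tipo, []) + [cod] = Dict.modify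
def classificar_codigos (codigos : List String) : List (String × List String) :=
  (codigos.foldl
    (fun out cod =>
      match codigo_to_tipo cod with
      | none => out
      | some tipo => out.modify tipo [] (fun x => x ++ [cod]))
    PySem.Dict.empty).items

-- ===== PORT B =====
-- scan to the first non-alphabetic char (the while loop), then cod[:k] / cod[k:]
def pvTipoAlt (codigo : String) : Option String :=
  let cod := (PySem.Str.upper codigo).toList
  let pref := cod.takeWhile PySem.Chars.isalpha
  let resto := cod.dropWhile PySem.Chars.isalpha
  if PySem.Chars.strIsdigit resto then PySem.Dict.get? prefixoToTipo (String.ofList pref)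
  else none

def classificar_codigos_alt (codigos : List String) : List (String × List String) :=
  let pares := codigos.map (fun c => (pvTipoAlt c, c))
  let ordem : PySem.Set String := PySem.Set.ofList (pares.filterMap (fun p => p.1))
  ordem.map (fun t => (t, pares.filterMap (fun p => if p.1 == some t then some p.2 else none)))

-- ===== PRECONDITION & SPEC =====
def Spec_classificar_codigos (codigos : List String) (out : List (String × List String)) : Prop := out = classificar_codigos_alt codigos
instance (codigos : List String) (out : List (String × List String)) : Decidable (Spec_classificar_codigos codigos out) := by unfold Spec_classificar_codigos; infer_instance

-- ===== CLAIM (what is proved, stated in full; the proofs are below) =====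
def Claim_equal_classificar_codigos : Prop := ∀ (codigos : List String), Dom_classificar_codigos codigos → Spec_classificar_codigos codigos (classificar_codigos codigos)

-- ===== LEMMAS AND PROOFS =====

theorem pvBeq1 (a c : Char) : ((String.ofList [a] : String) == String.ofList [c]) = (a == c) := by
  cases hd : (a == c) <;> simp_all [String.ofList_inj]

theorem pvGetNil (x : String) : (PySem.Dict.mk ([] : List (String × String))).get? x = none := rfl

theorem pvGet1 (c : Char) : prefixoToTipo.get? (String.ofList [c]) =
    if c = 'E' then some "ESTRUTURAL" else if c = 'P' then some "PROBLEMA"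
    else if c = 'R' then some "REPERTORIO" else if c = 'K' then some "PALAVRA_CHAVE"
    else if c = 'A' then some "AGENTE" else if c = 'F' then some "FIM" else none := by
  have h : prefixoToTipo = PySem.Dict.mk
    [("E", "ESTRUTURAL"), ("P", "PROBLEMA"), ("R", "REPERTORIO"), ("K", "PALAVRA_CHAVE"),
     ("A", "AGENTE"), ("AC", "ACAO"), ("ME", "MEIO"), ("F", "FIM")] := rfl
  have e2 : ∀ a b : Char, ((String.ofList [a,b] : String) == String.ofList [c]) = false := by
    intro a b; simp [String.ofList_inj]
  rw [h]
  simp only [PySem.Dict.get?_mk_cons]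
  rw [show ("E":String) = String.ofList ['E'] from rfl, show ("P":String) = String.ofList ['P'] from rfl,
      show ("R":String) = String.ofList ['R'] from rfl, show ("K":String) = String.ofList ['K'] from rfl,
      show ("A":String) = String.ofList ['A'] from rfl, show ("AC":String) = String.ofList ['A','C'] from rfl,
      show ("ME":String) = String.ofList ['M','E'] from rfl, show ("F":String) = String.ofList ['F'] from rfl]
  simp only [pvBeq1, e2, beq_iff_eq, Bool.false_eq_true, if_false]
  simp only [pvGetNil]
  split_ifs <;> simp_all <;> simp_all [eq_comm]

theorem pvGet2 (c c2 : Char) : prefixoToTipo.get? (String.ofList [c, c2]) =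
    if c = 'A' ∧ c2 = 'C' then some "ACAO" else if c = 'M' ∧ c2 = 'E' then some "MEIO" else none := by
  have h : prefixoToTipo = PySem.Dict.mk
    [("E", "ESTRUTURAL"), ("P", "PROBLEMA"), ("R", "REPERTORIO"), ("K", "PALAVRA_CHAVE"),
     ("A", "AGENTE"), ("AC", "ACAO"), ("ME", "MEIO"), ("F", "FIM")] := rfl
  have e1 : ∀ a : Char, ((String.ofList [a] : String) == String.ofList [c, c2]) = false := by
    intro a; simp [String.ofList_inj]
  have e2 : ∀ a b : Char, ((String.ofList [a, b] : String) == String.ofList [c, c2]) = (a == c && b == c2) := by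
    intro a b
    cases h1 : (a == c) <;> cases h2 : (b == c2) <;> simp_all [String.ofList_inj]
  rw [h]
  simp only [PySem.Dict.get?_mk_cons]
  rw [show ("E":String) = String.ofList ['E'] from rfl, show ("P":String) = String.ofList ['P'] from rfl,
      show ("R":String) = String.ofList ['R'] from rfl, show ("K":String) = String.ofList ['K'] from rfl,
      show ("A":String) = String.ofList ['A'] from rfl, show ("AC":String) = String.ofList ['A','C'] from rfl,
      show ("ME":String) = String.ofList ['M','E'] from rfl, show ("F":String) = String.ofList ['F'] from rfl]
  simp only [e1, e2, Bool.false_eq_true, if_false, Bool.and_eq_true, beq_iff_eq]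
  simp only [pvGetNil]
  split_ifs <;> simp_all <;> simp_all [eq_comm]

theorem pvGet3 (a b d : Char) (l : List Char) : prefixoToTipo.get? (String.ofList (a :: b :: d :: l)) = none := by
  have h : prefixoToTipo = PySem.Dict.mk
    [("E", "ESTRUTURAL"), ("P", "PROBLEMA"), ("R", "REPERTORIO"), ("K", "PALAVRA_CHAVE"),
     ("A", "AGENTE"), ("AC", "ACAO"), ("ME", "MEIO"), ("F", "FIM")] := rfl
  rw [h]
  simp only [PySem.Dict.get?_mk_cons]
  rw [show ("E":String) = String.ofList ['E'] from rfl, show ("P":String) = String.ofList ['P'] from rfl,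
      show ("R":String) = String.ofList ['R'] from rfl, show ("K":String) = String.ofList ['K'] from rfl,
      show ("A":String) = String.ofList ['A'] from rfl, show ("AC":String) = String.ofList ['A','C'] from rfl,
      show ("ME":String) = String.ofList ['M','E'] from rfl, show ("F":String) = String.ofList ['F'] from rfl]
  have e : ∀ (m : List Char), (String.ofList m == String.ofList (a :: b :: d :: l)) = decide (m = a :: b :: d :: l) := by
    intro m; cases hd : decide (m = a :: b :: d :: l) <;> simp_all [String.ofList_inj]
  simp [e, pvGetNil]

theorem pvNeSymmOfBeq {a b : Char} (h : (a == b) = false) : ¬ (b = a) := fun hh => by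
  subst hh; simp at h

theorem pvKeyVals :
    prefixoToTipo.getD "AC" "" = "ACAO" ∧ prefixoToTipo.getD "ME" "" = "MEIO" ∧
    prefixoToTipo.getD "E" "" = "ESTRUTURAL" ∧ prefixoToTipo.getD "P" "" = "PROBLEMA" ∧
    prefixoToTipo.getD "R" "" = "REPERTORIO" ∧ prefixoToTipo.getD "K" "" = "PALAVRA_CHAVE" ∧
    prefixoToTipo.getD "A" "" = "AGENTE" ∧ prefixoToTipo.getD "F" "" = "FIM" ∧
    prefixoToTipo.get? "AC" = some "ACAO" ∧ prefixoToTipo.get? "ME" = some "MEIO" ∧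
    prefixoToTipo.get? "E" = some "ESTRUTURAL" ∧ prefixoToTipo.get? "P" = some "PROBLEMA" ∧
    prefixoToTipo.get? "R" = some "REPERTORIO" ∧ prefixoToTipo.get? "K" = some "PALAVRA_CHAVE" ∧
    prefixoToTipo.get? "A" = some "AGENTE" ∧ prefixoToTipo.get? "F" = some "FIM" := by
  refine ⟨rfl, rfl, rfl, rfl, rfl, rfl, rfl, rfl, rfl, rfl, rfl, rfl, rfl, rfl, rfl, rfl⟩

theorem pvSlice2 (a b : Char) (l : List Char) : PySem.List.slice (a :: b :: l) (some 2) none = l := by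
  simp [PySem.List.slice, PySem.List.clampIdx]

theorem pvAlphaNotDigit (c : Char) (h : PySem.Chars.isalpha c = true) : PySem.Chars.isdigit c = false := by
  have h1 : ('A':Char).val.toNat = 65 := rfl
  have h2 : ('Z':Char).val.toNat = 90 := rfl
  have h3 : ('a':Char).val.toNat = 97 := rfl
  have h4 : ('z':Char).val.toNat = 122 := rfl
  have h5 : ('0':Char).val.toNat = 48 := rfl
  have h6 : ('9':Char).val.toNat = 57 := rfl
  simp only [PySem.Chars.isalpha, PySem.Chars.isupper, PySem.Chars.islower, PySem.Chars.isdigit,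
    Bool.or_eq_true, Bool.and_eq_true, decide_eq_true_eq, Char.le_def, UInt32.le_iff_toNat_le] at *
  simp only [Bool.and_eq_false_iff, decide_eq_false_iff_not, not_le]
  omega

theorem pvNeAlpha (c' c : Char) (h' : PySem.Chars.isalpha c' = true) (h : PySem.Chars.isalpha c = false) :
    (c' == c) = false := by
  cases hb : (c' == c)
  · rfl
  · rw [beq_iff_eq] at hb; subst hb; rw [h] at h'; cases h'


theorem tipo_eq (s : String) : codigo_to_tipo s = pvTipoAlt s := by
  unfold codigo_to_tipo pvTipoAlt
  simp only [pysem]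
  generalize PySem.Chars.upper s.toList = cs
  cases cs with
  | nil => decide
  | cons c t =>
    by_cases hc : PySem.Chars.isalpha c
    case neg =>
      rw [Bool.not_eq_true] at hc
      have hA := pvNeAlpha 'A' c (by decide) hc
      have hM := pvNeAlpha 'M' c (by decide) hc
      have hE := pvNeAlpha 'E' c (by decide) hc
      have hP := pvNeAlpha 'P' c (by decide) hc
      have hR := pvNeAlpha 'R' c (by decide) hc
      have hK := pvNeAlpha 'K' c (by decide) hc
      have hF := pvNeAlpha 'F' c (by decide) hc
      simp [PySem.Chars.startswith, List.isPrefixOf, hA, hM, hE, hP, hR, hK, hF, hc,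
        show prefixoToTipo.get? (String.ofList []) = none from rfl]
    case pos =>
      cases t with
      | nil =>
        simp [PySem.Chars.startswith, List.isPrefixOf, hc, PySem.Chars.strIsdigit, PySem.List.slice]
      | cons c2 u =>
        by_cases hc2 : PySem.Chars.isalpha c2
        case pos =>
          have hd2 : PySem.Chars.isdigit c2 = false := pvAlphaNotDigit c2 hc2
          cases u with
          | nil =>
            simp [PySem.Chars.startswith, List.isPrefixOf, hc, hc2, hd2,
              PySem.Chars.strIsdigit, PySem.List.slice]
          | cons d v =>
            by_cases hd : PySem.Chars.isalpha d
            case pos =>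
              have hdd : PySem.Chars.isdigit d = false := pvAlphaNotDigit d hd
              simp [PySem.Chars.startswith, List.isPrefixOf, hc, hc2, hd, hdd, hd2,
                PySem.Chars.strIsdigit, PySem.List.slice, pvGet3]
            case neg =>
              rw [Bool.not_eq_true] at hd
              obtain ⟨k1, k2, k3, k4, k5, k6, k7, k8, g1, g2, g3, g4, g5, g6, g7, g8⟩ := pvKeyVals
              simp only [pvSlice2]
              by_cases hA : ('A' == c) = true
              · rw [beq_iff_eq] at hA; subst hA
                by_cases hC : ('C' == c2) = true
                · rw [beq_iff_eq] at hC; subst hC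
                  simp [PySem.Chars.startswith, List.isPrefixOf, hc, hc2, hd, hd2, pvGet2,
                    PySem.Chars.strIsdigit, k1, k2, g1, g2]
                · rw [Bool.not_eq_true] at hC
                  simp [PySem.Chars.startswith, List.isPrefixOf, hc, hc2, hd, hd2, pvGet2,
                    PySem.Chars.strIsdigit, hC, pvNeSymmOfBeq hC, k1, k2, g1, g2]
              · by_cases hM : ('M' == c) = true
                · rw [beq_iff_eq] at hM; subst hM
                  by_cases hE : ('E' == c2) = true
                  · rw [beq_iff_eq] at hE; subst hE
                    simp [PySem.Chars.startswith, List.isPrefixOf, hc, hc2, hd, hd2, pvGet2,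
                      PySem.Chars.strIsdigit, k1, k2, g1, g2]
                  · rw [Bool.not_eq_true] at hE
                    simp [PySem.Chars.startswith, List.isPrefixOf, hc, hc2, hd, hd2, pvGet2,
                      PySem.Chars.strIsdigit, hE, pvNeSymmOfBeq hE, k1, k2, g1, g2]
                · rw [Bool.not_eq_true] at hA hM
                  simp [PySem.Chars.startswith, List.isPrefixOf, hc, hc2, hd, hd2, pvGet2,
                    PySem.Chars.strIsdigit, hA, hM, pvNeSymmOfBeq hA, pvNeSymmOfBeq hM, k1, k2, g1, g2]
        case neg =>
          rw [Bool.not_eq_true] at hc2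
          have hC := pvNeAlpha 'C' c2 (by decide) hc2
          have hE2 := pvNeAlpha 'E' c2 (by decide) hc2
          obtain ⟨k1, k2, k3, k4, k5, k6, k7, k8, g1, g2, g3, g4, g5, g6, g7, g8⟩ := pvKeyVals
          by_cases hE : ('E' == c) = true
          · rw [beq_iff_eq] at hE; subst hE
            simp [PySem.Chars.startswith, List.isPrefixOf, hc, hc2, hC, hE2, pvGet1,
              PySem.Chars.strIsdigit, k3, k4, k5, k6, k7, k8, g3, g4, g5, g6, g7, g8]
          by_cases hP : ('P' == c) = true
          · rw [beq_iff_eq] at hP; subst hP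
            simp [PySem.Chars.startswith, List.isPrefixOf, hc, hc2, hC, hE2, pvGet1,
              PySem.Chars.strIsdigit, k3, k4, k5, k6, k7, k8, g3, g4, g5, g6, g7, g8]
          by_cases hR : ('R' == c) = true
          · rw [beq_iff_eq] at hR; subst hR
            simp [PySem.Chars.startswith, List.isPrefixOf, hc, hc2, hC, hE2, pvGet1,
              PySem.Chars.strIsdigit, k3, k4, k5, k6, k7, k8, g3, g4, g5, g6, g7, g8]
          by_cases hK : ('K' == c) = true
          · rw [beq_iff_eq] at hK; subst hK
            simp [PySem.Chars.startswith, List.isPrefixOf, hc, hc2, hC, hE2, pvGet1,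
              PySem.Chars.strIsdigit, k3, k4, k5, k6, k7, k8, g3, g4, g5, g6, g7, g8]
          by_cases hA : ('A' == c) = true
          · rw [beq_iff_eq] at hA; subst hA
            simp [PySem.Chars.startswith, List.isPrefixOf, hc, hc2, hC, hE2, pvGet1,
              PySem.Chars.strIsdigit, k3, k4, k5, k6, k7, k8, g3, g4, g5, g6, g7, g8]
          by_cases hF : ('F' == c) = true
          · rw [beq_iff_eq] at hF; subst hF
            simp [PySem.Chars.startswith, List.isPrefixOf, hc, hc2, hC, hE2, pvGet1,
              PySem.Chars.strIsdigit, k3, k4, k5, k6, k7, k8, g3, g4, g5, g6, g7, g8]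
          rw [Bool.not_eq_true] at hE hP hR hK hA hF
          simp [PySem.Chars.startswith, List.isPrefixOf, hc, hc2, hC, hE2, pvGet1,
            PySem.Chars.strIsdigit, hE, hP, hR, hK, hA, hF, pvNeSymmOfBeq hE, pvNeSymmOfBeq hP,
            pvNeSymmOfBeq hR, pvNeSymmOfBeq hK, pvNeSymmOfBeq hA, pvNeSymmOfBeq hF]


-- A's skip-on-none loop is the uniform modify loop over the tipo-tagged pairs
theorem foldl_skip (codigos : List String) (d : PySem.Dict String (List String)) :
    codigos.foldl
      (fun out cod =>
        match codigo_to_tipo cod with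
        | none => out
        | some tipo => out.modify tipo [] (fun x => x ++ [cod])) d
    = (codigos.filterMap (fun c => (codigo_to_tipo c).map (fun t => (t, c)))).foldl
        (fun out p => out.modify p.1 [] (fun x => x ++ [p.2])) d := by
  induction codigos generalizing d with
  | nil => rfl
  | cons c cs ih =>
    cases h : codigo_to_tipo c <;> simp [h, ih]

theorem values_eq (t : String) (codigos : List String) :
    ((codigos.filterMap (fun c => (codigo_to_tipo c).map (fun t' => (t', c)))).filter
        (fun p => p.1 == t)).map (fun p => p.2)
    = codigos.filterMap (fun c => if codigo_to_tipo c == some t then some c else none) := by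
  induction codigos with
  | nil => rfl
  | cons c cs ih =>
    cases h : codigo_to_tipo c with
    | none => simp [h, ih]
    | some t' =>
      by_cases ht : t' = t <;> simp [h, ht, ih]

theorem keys_proj (codigos : List String) :
    (codigos.filterMap (fun c => (codigo_to_tipo c).map (fun t => (t, c)))).map (fun p => p.1)
    = codigos.filterMap codigo_to_tipo := by
  induction codigos with
  | nil => rfl
  | cons c cs ih => cases h : codigo_to_tipo c <;> simp [h, ih]

-- the uniform modify loop groups: items = map over first-occurrence keys of the filtered values
theorem group_items (l : List (String × String)) :
    ((l.foldl (fun out p => out.modify p.1 [] (fun x => x ++ [p.2])) PySem.Dict.empty)).items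
    = (PySem.Set.ofList (l.map (fun p => p.1))).map
        (fun t => (t, (l.filter (fun p => p.1 == t)).map (fun p => p.2))) := by
  have hnd : ((l.foldl (fun out p => out.modify p.1 [] (fun x => x ++ [p.2])) PySem.Dict.empty)).keys.Nodup :=
    PySem.Dict.nodup_keys_foldl_modify_key l Prod.fst [] (fun d p x => x ++ [p.2]) PySem.Dict.empty (by simp [pysem])
  rw [PySem.Dict.items_eq_map_keys _ hnd ([] : List String)]
  rw [PySem.Dict.keys_foldl_modify_key l Prod.fst [] (fun d p x => x ++ [p.2]) PySem.Dict.empty]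
  simp only [PySem.Dict.getD_foldl_modify_append, PySem.Dict.getD_empty, List.nil_append]
  rfl

-- ===== VERDICT (by name: the statement is the Claim_ definition above) =====
theorem classificar_codigos_spec : Claim_equal_classificar_codigos := by
  intro codigos _
  unfold Spec_classificar_codigos
  show classificar_codigos codigos = classificar_codigos_alt codigos
  unfold classificar_codigos classificar_codigos_alt
  rw [foldl_skip, group_items]
  simp only [List.filterMap_map, Function.comp_def, ← tipo_eq]
  rw [keys_proj]
  refine List.map_congr_left (fun t _ => ?_)
  rw [values_eq]
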